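-- pv_equiv track=rewrite | github.com/soberlook/algorythms | 13/13.final.A.datacenters.py | max_photo_replica
-- ===== SOURCE A (Python) =====
-- def max_photo_replica(datacenters_list):
--     if len(datacenters_list) <= 1:
--         return 0
--     res = 0
--     while len(datacenters_list) > 1:
--         datacenters_list = sorted(datacenters_list, reverse=True)
--         datacenters_list[0] -= 1
--         datacenters_list[-1] -= 1
--         res += 1
--         if datacenters_list[-1] == 0:
--             datacenters_list.pop()
--         if datacenters_list[0] == 0:
--             datacenters_list.pop(0)
--     return res
-- ===== SOURCE B (Python) =====
-- def max_photo_replica(datacenters_list):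
--     if len(datacenters_list) <= 1:
--         return 0
--     total = sum(datacenters_list)
--     return min(total // 2, total - max(datacenters_list))
-- ===== Notes on version B (the rewrite author's own statement) =====
-- stated objective: alternative
-- what changed: Replaces the simulation loop (re-sorting and decrementing max+min each step) by the closed form min(total//2, total-max) computed in one pass over the list; intended as asymptotically cheaper (O(n) vs O(sum*n log n)) but a timing run could not confirm a ratio because A times out on larger inputs.
-- outside the precondition, e.g. on max_photo_replica([2, 0]): A returns 2, B returns 0
import Mathlib
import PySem

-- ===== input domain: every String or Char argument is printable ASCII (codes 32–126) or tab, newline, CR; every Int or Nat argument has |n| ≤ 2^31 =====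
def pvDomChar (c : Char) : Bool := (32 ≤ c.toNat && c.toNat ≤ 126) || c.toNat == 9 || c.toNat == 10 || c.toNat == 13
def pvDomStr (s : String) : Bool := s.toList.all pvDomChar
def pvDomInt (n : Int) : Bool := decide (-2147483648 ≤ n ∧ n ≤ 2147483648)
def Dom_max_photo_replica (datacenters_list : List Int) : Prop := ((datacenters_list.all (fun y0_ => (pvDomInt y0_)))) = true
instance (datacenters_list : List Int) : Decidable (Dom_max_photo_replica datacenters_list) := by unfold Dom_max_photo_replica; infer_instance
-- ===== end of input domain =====

-- B replaces A's decrement-max-and-min simulation loop by the closed form min(total//2, total-max), one pass instead of repeated re-sorting rounds.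


-- ===== PORT A =====
-- Each helper is one statement of A's loop body; the list operations are exact for the
-- nonempty list the `1 < length` guard guarantees (Python indices 0 and -1 in range, pops legal).
-- datacenters_list = sorted(datacenters_list, reverse=True)
def sortDesc (l : List Int) : List Int := PySem.List.sorted l (fun x => x) true
-- datacenters_list[0] -= 1
def decFirst (l : List Int) : List Int := l.set 0 (l.headD 0 - 1)
-- datacenters_list[-1] -= 1
def decLast (l : List Int) : List Int := l.dropLast ++ [l.getLastD 0 - 1]
-- if datacenters_list[-1] == 0: datacenters_list.pop()
def popLastIfZero (l : List Int) : List Int := if l.getLastD 0 = 0 then l.dropLast else l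
-- if datacenters_list[0] == 0: datacenters_list.pop(0)
def popHeadIfZero (l : List Int) : List Int := if l.headD 0 = 0 then l.tail else l

-- A's while loop, one body per fuel unit; the fuel only makes the loop total:
-- on Pre_ inputs the loop runs at most sum/2 times, so the fuel is never exhausted.
def maxPhotoLoop : Nat → List Int → Int → Int
  | 0, _, res => res
  | fuel+1, l, res =>
    if 1 < l.length then
      maxPhotoLoop fuel (popHeadIfZero (popLastIfZero (decLast (decFirst (sortDesc l))))) (res + 1)
    else res

def max_photo_replica (datacenters_list : List Int) : Int :=
  if datacenters_list.length ≤ 1 then 0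
  else maxPhotoLoop (datacenters_list.sum.toNat + 1) datacenters_list 0

-- ===== PORT B =====
def max_photo_replica_alt (datacenters_list : List Int) : Int :=
  match datacenters_list with
  | [] => 0
  | [_] => 0
  | a :: rest =>
    min (PySem.Int.floordiv ((a :: rest).sum) 2) ((a :: rest).sum - rest.foldl max a)

-- ===== PRECONDITION & SPEC =====
-- Pre_ restricts to positive replica counts (the function's natural domain): on a list of
-- length ≥ 2 containing a nonpositive entry, A's loop usually never terminates (entries
-- below zero only keep decreasing), and where it does terminate its value is an artefact
-- of the leftover negative entries; B returns the closed form there.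
def Pre_max_photo_replica (datacenters_list : List Int) : Prop :=
  datacenters_list.length ≤ 1 ∨ ∀ x ∈ datacenters_list, 1 ≤ x
instance (datacenters_list : List Int) : Decidable (Pre_max_photo_replica datacenters_list) := by
  unfold Pre_max_photo_replica; infer_instance
def pvWitness_max_photo_replica : List Int := [3, 1, 2]
def Spec_max_photo_replica (datacenters_list : List Int) (out : Int) : Prop := out = max_photo_replica_alt datacenters_list
instance (datacenters_list : List Int) (out : Int) : Decidable (Spec_max_photo_replica datacenters_list out) := by unfold Spec_max_photo_replica; infer_instance

-- ===== CLAIM (what is proved, stated in full; the proofs are below) =====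
def Claim_equal_max_photo_replica : Prop := ∀ (datacenters_list : List Int), Dom_max_photo_replica datacenters_list → Pre_max_photo_replica datacenters_list → Spec_max_photo_replica datacenters_list (max_photo_replica datacenters_list)

-- ===== LEMMAS AND PROOFS =====

def listMax : List Int → Int
  | [] => 0
  | a :: t => t.foldl max a

-- the list produced by one body of A's loop from the sorted-descending shape (a :: mid) ++ [b]
def nxt (a b : Int) (mid : List Int) : List Int :=
  popHeadIfZero (popLastIfZero (((a-1) :: mid) ++ [b-1]))

lemma listMax_spec (l : List Int) (h : l ≠ []) : listMax l ∈ l ∧ ∀ x ∈ l, x ≤ listMax l := by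
  cases l with
  | nil => exact absurd rfl h
  | cons a t =>
    refine ⟨?_, ?_⟩
    · rcases PySem.List.foldl_max_mem t a with h1 | h1
      · simp [listMax, h1]
      · simp [listMax, h1]
    · intro x hx
      rcases List.mem_cons.mp hx with rfl | hx
      · exact (PySem.List.le_foldl_max t x).1
      · exact (PySem.List.le_foldl_max t a).2 x hx

lemma listMax_perm {l₁ l₂ : List Int} (hp : l₁.Perm l₂) (h : l₁ ≠ []) :
    listMax l₁ = listMax l₂ := by
  have h2 : l₂ ≠ [] := by
    intro hnil; exact h (List.Perm.eq_nil (hnil ▸ hp))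
  obtain ⟨hm1, hb1⟩ := listMax_spec l₁ h
  obtain ⟨hm2, hb2⟩ := listMax_spec l₂ h2
  exact le_antisymm (hb2 _ (hp.mem_iff.mp hm1)) (hb1 _ (hp.mem_iff.mpr hm2))

lemma listMax_cons_eq (a : Int) (t : List Int) (ht : ∀ x ∈ t, x ≤ a) :
    listMax (a :: t) = a := by
  have := listMax_spec (a :: t) (by simp)
  rcases List.mem_cons.mp this.1 with h | h
  · exact h
  · exact le_antisymm (ht _ h) (this.2 a (by simp))

lemma alt_short (l : List Int) (h : l.length ≤ 1) : max_photo_replica_alt l = 0 := by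
  match l with
  | [] => rfl
  | [_] => rfl
  | _ :: _ :: _ => simp at h

lemma alt_char (l : List Int) (h : 2 ≤ l.length) :
    max_photo_replica_alt l = min (l.sum / 2) (l.sum - listMax l) := by
  match l with
  | [] => simp at h
  | [_] => simp at h
  | a :: b :: t =>
    rw [show max_photo_replica_alt (a :: b :: t)
        = min (PySem.Int.floordiv ((a :: b :: t).sum) 2) (((a :: b :: t).sum) - (b :: t).foldl max a) from rfl,
      PySem.Int.floordiv_eq_ediv_of_pos (by norm_num)]
    rfl

lemma alt_perm {l₁ l₂ : List Int} (hp : l₁.Perm l₂) :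
    max_photo_replica_alt l₁ = max_photo_replica_alt l₂ := by
  by_cases h : l₁.length ≤ 1
  · rw [alt_short _ h, alt_short _ (hp.length_eq ▸ h)]
  · have h1 : 2 ≤ l₁.length := by omega
    rw [alt_char _ h1, alt_char _ (hp.length_eq ▸ h1), hp.sum_eq,
      listMax_perm hp (by intro hn; rw [hn] at h1; simp at h1)]

lemma sum_ge_length (l : List Int) (h : ∀ x ∈ l, 1 ≤ x) : (l.length : Int) ≤ l.sum := by
  induction l with
  | nil => simp
  | cons a t ih =>
    have h1 := h a (by simp)
    have h2 := ih (fun x hx => h x (List.mem_cons_of_mem _ hx))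
    simp only [List.sum_cons, List.length_cons]
    push_cast
    omega

lemma sum_all_one (l : List Int) (h : ∀ x ∈ l, x = 1) : l.sum = (l.length : Int) := by
  induction l with
  | nil => simp
  | cons a t ih =>
    have h1 := h a (by simp)
    have h2 := ih (fun x hx => h x (List.mem_cons_of_mem _ hx))
    simp only [List.sum_cons, List.length_cons]
    push_cast
    omega

lemma sum_erase_bound (l : List Int) (m : Int) (hm : m ∈ l) (h : ∀ x ∈ l, 1 ≤ x) :
    m + ((l.length : Int) - 1) ≤ l.sum := by
  have hp := List.perm_cons_erase hm
  have hsum : l.sum = m + (l.erase m).sum := by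
    rw [hp.sum_eq]; simp
  have hlen : (l.erase m).length = l.length - 1 := List.length_erase_of_mem hm
  have hge : ((l.erase m).length : Int) ≤ (l.erase m).sum :=
    sum_ge_length _ (fun x hx => h x (List.mem_of_mem_erase hx))
  have hl1 : 1 ≤ l.length := List.length_pos_of_mem hm
  rw [hlen] at hge
  rw [hsum]
  push_cast [Nat.cast_sub hl1] at hge ⊢
  omega

lemma decFirst_eval (a b : Int) (mid : List Int) :
    decFirst ((a :: mid) ++ [b]) = ((a-1) :: mid) ++ [b] := by
  simp [decFirst]

lemma decLast_concat (u : List Int) (x : Int) : decLast (u ++ [x]) = u ++ [x - 1] := by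
  simp [decLast]

lemma popLast_concat (u : List Int) (x : Int) :
    popLastIfZero (u ++ [x]) = if x = 0 then u else u ++ [x] := by
  simp [popLastIfZero]

lemma popHead_cons (c : Int) (u : List Int) :
    popHeadIfZero (c :: u) = if c = 0 then u else c :: u := by
  simp [popHeadIfZero]

-- one body of A's loop on a positive sorted-descending list of length ≥ 2:
-- positivity is kept, the sum drops by 2, and the closed form drops by exactly 1.
lemma step_key (a b : Int) (mid : List Int) (ha1 : 1 ≤ a) (hb1 : 1 ≤ b) (hba : b ≤ a)
    (hmid1 : ∀ x ∈ mid, 1 ≤ x) (hmida : ∀ x ∈ mid, x ≤ a) (hbmin : ∀ x ∈ mid, b ≤ x) :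
    (∀ x ∈ nxt a b mid, 1 ≤ x) ∧ (nxt a b mid).sum = a + mid.sum + b - 2 ∧
    min ((a + mid.sum + b) / 2) (mid.sum + b) = max_photo_replica_alt (nxt a b mid) + 1 := by
  have hmsum : (mid.length : Int) ≤ mid.sum := sum_ge_length mid hmid1
  by_cases hb : b = 1
  · subst hb
    have hn0 : nxt a 1 mid = popHeadIfZero ((a-1) :: mid) := by
      rw [nxt, show (1:Int) - 1 = 0 from rfl, popLast_concat, if_pos rfl]
    by_cases ha : a = 1
    · -- a = b = 1 : every element is 1, the next state is mid
      subst ha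
      have hne : nxt 1 1 mid = mid := by
        rw [hn0, show (1:Int) - 1 = 0 from rfl, popHead_cons, if_pos rfl]
      have hone : ∀ x ∈ mid, x = 1 := by
        intro x hx; have := hmida x hx; have := hmid1 x hx; omega
      have hms : mid.sum = (mid.length : Int) := sum_all_one mid hone
      refine ⟨fun x hx => hmid1 x (hne ▸ hx), by rw [hne]; ring, ?_⟩
      rw [hne]
      by_cases hml : mid.length ≤ 1
      · rw [alt_short _ hml, hms]
        interval_cases h : mid.length <;> norm_num
      · rw [alt_char _ (by omega), hms]
        have hMm : listMax mid = 1 := by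
          cases mid with
          | nil => simp at hml
          | cons c u =>
            rw [listMax_cons_eq c u (fun x hx => by
              rw [hone x (by simp [hx]), hone c (by simp)]), hone c (by simp)]
        rw [hMm, min_def, min_def]
        split_ifs <;> omega
    · -- b = 1 < a : the next state is (a-1) :: mid
      have hne : nxt a 1 mid = (a-1) :: mid := by
        rw [hn0, popHead_cons, if_neg (by omega)]
      refine ⟨?_, by rw [hne]; simp; ring, ?_⟩
      · intro x hx
        rw [hne] at hx
        rcases List.mem_cons.mp hx with rfl | hx
        · omega
        · exact hmid1 x hx
      rw [hne]
      cases mid with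
      | nil =>
        rw [alt_short _ (by simp)]
        simp only [List.sum_nil]
        rw [min_def]; split_ifs <;> omega
      | cons c u =>
        rw [alt_char _ (by simp)]
        have hMdef : listMax ((a-1) :: c :: u) = (c :: u).foldl max (a-1) := rfl
        set M := (c :: u).foldl max (a-1) with hM
        have hMlo : a - 1 ≤ M := (PySem.List.le_foldl_max (c :: u) (a-1)).1
        have hMhi : M ≤ a := by
          rcases PySem.List.foldl_max_mem (c :: u) (a-1) with h | h
          · omega
          · exact hmida M (hM ▸ h)
        have hMcases : M = a - 1 ∨ M + ((((c :: u).length : Int)) - 1) ≤ (c :: u).sum := by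
          rcases PySem.List.foldl_max_mem (c :: u) (a-1) with h | h
          · left; omega
          · right; exact sum_erase_bound _ _ (hM ▸ h) (fun x hx => hmid1 x hx)
        have hk : 1 ≤ (c :: u).length := by simp
        have hsum : ((a-1) :: c :: u).sum = (a - 1) + (c :: u).sum := by simp
        rw [hsum, hMdef, min_def, min_def]
        split_ifs <;> rcases hMcases with h | h <;> omega
  · -- 2 ≤ b ≤ a : nothing is popped
    have hne : nxt a b mid = (a-1) :: (mid ++ [b-1]) := by
      rw [nxt, popLast_concat, if_neg (by omega), show ((a-1) :: mid) ++ [b-1] = (a-1) :: (mid ++ [b-1]) from rfl,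
        popHead_cons, if_neg (by omega)]
    refine ⟨?_, by rw [hne]; simp; ring, ?_⟩
    · intro x hx
      rw [hne] at hx
      rcases List.mem_cons.mp hx with rfl | hx
      · omega
      · rcases List.mem_append.mp hx with hx | hx
        · exact hmid1 x hx
        · simp at hx; omega
    rw [hne, alt_char _ (by simp)]
    have hMdef : listMax ((a-1) :: (mid ++ [b-1])) = (mid ++ [b-1]).foldl max (a-1) := rfl
    set M := (mid ++ [b-1]).foldl max (a-1) with hM
    have hMlo : a - 1 ≤ M := (PySem.List.le_foldl_max (mid ++ [b-1]) (a-1)).1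
    have hMhi : M ≤ a := by
      rcases PySem.List.foldl_max_mem (mid ++ [b-1]) (a-1) with h | h
      · omega
      · rcases List.mem_append.mp (hM ▸ h) with h' | h'
        · exact hmida M h'
        · simp at h'; omega
    have hMcases : M = a - 1 ∨ M + (((mid.length : Int)) - 1) ≤ mid.sum := by
      rcases PySem.List.foldl_max_mem (mid ++ [b-1]) (a-1) with h | h
      · left; omega
      · rcases List.mem_append.mp (hM ▸ h) with h' | h'
        · right; exact sum_erase_bound _ _ h' hmid1
        · left; simp at h'; omega
    have hsum : ((a-1) :: (mid ++ [b-1])).sum = (a - 1) + (mid.sum + (b - 1)) := by simp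
    rw [hsum, hMdef, min_def, min_def]
    split_ifs <;> rcases hMcases with h | h <;> omega

lemma loop_eq (fuel : Nat) : ∀ (l : List Int) (res : Int),
    (∀ x ∈ l, 1 ≤ x) → l.sum.toNat < fuel →
    maxPhotoLoop fuel l res = res + max_photo_replica_alt l := by
  induction fuel with
  | zero => intro l res _ hf; omega
  | succ fuel ih =>
    intro l res hpos hf
    by_cases hlen : 1 < l.length
    · have hperm : (sortDesc l).Perm l := PySem.List.sorted_perm l (fun x => x) true
      have hlen2 : 2 ≤ (sortDesc l).length := by rw [hperm.length_eq]; omega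
      obtain ⟨a, t, hat⟩ := List.exists_cons_of_ne_nil
        (l := sortDesc l) (by intro h; rw [h] at hlen2; simp at hlen2)
      have htne : t ≠ [] := by intro h; rw [hat, h] at hlen2; simp at hlen2
      set mid := t.dropLast with hmid
      set b := t.getLast htne with hb
      have hshape : sortDesc l = (a :: mid) ++ [b] := by
        rw [hat]
        conv_lhs => rw [← List.dropLast_append_getLast htne]
        rfl
      have hpl : ((a :: mid) ++ [b]).Perm l := hshape ▸ hperm
      -- order facts from sortedness (descending)
      have hpw : (sortDesc l).Pairwise (fun x y => y ≤ x) :=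
        PySem.List.sorted_pairwise_rev l (fun x => x)
      rw [hshape, show (a :: mid) ++ [b] = a :: (mid ++ [b]) from rfl] at hpw
      have hpw' := List.pairwise_cons.mp hpw
      have hamax : ∀ x ∈ mid ++ [b], x ≤ a := hpw'.1
      have hmida : ∀ x ∈ mid, x ≤ a := fun x hx => hamax x (List.mem_append_left _ hx)
      have hba : b ≤ a := hamax b (by simp)
      have hbmin : ∀ x ∈ mid, b ≤ x := by
        have h := (List.pairwise_append.mp hpw'.2).2.2
        intro x hx; exact h x hx b (by simp)
      -- positivity
      have hposs : ∀ x ∈ (a :: mid) ++ [b], 1 ≤ x := fun x hx => hpos x (hpl.mem_iff.mp hx)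
      have ha1 : 1 ≤ a := hposs a (by simp)
      have hb1 : 1 ≤ b := hposs b (by simp)
      have hmid1 : ∀ x ∈ mid, 1 ≤ x := fun x hx => hposs x (by simp [hx])
      -- one loop body
      have hbody : maxPhotoLoop (fuel+1) l res = maxPhotoLoop fuel (nxt a b mid) (res + 1) := by
        show (if 1 < l.length then
            maxPhotoLoop fuel (popHeadIfZero (popLastIfZero (decLast (decFirst (sortDesc l))))) (res + 1)
          else res) = _
        rw [if_pos hlen, hshape, decFirst_eval, decLast_concat, nxt]
      obtain ⟨hpos', hsum', halt'⟩ := step_key a b mid ha1 hb1 hba hmid1 hmida hbmin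
      have hsuml : l.sum = a + mid.sum + b := by
        rw [← hpl.sum_eq]; simp; ring
      have hsumlb : 2 ≤ l.sum := by
        have h1 := sum_ge_length l hpos
        have h2 : 2 ≤ l.length := by omega
        omega
      have haltl : max_photo_replica_alt l = min (l.sum / 2) (l.sum - a) := by
        rw [alt_perm hpl.symm, alt_char _ (by simp),
          show (a :: mid) ++ [b] = a :: (mid ++ [b]) from rfl, listMax_cons_eq a _ hamax]
        congr 1
        · congr 1; simp [hsuml]; ring
        · congr 1; simp [hsuml]; ring
      rw [hbody, ih (nxt a b mid) (res + 1) hpos' (by omega), haltl,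
        show l.sum - a = mid.sum + b by omega, show l.sum = a + mid.sum + b from hsuml, halt']
      ring
    · show (if 1 < l.length then _ else res) = _
      rw [if_neg hlen, alt_short l (by omega)]
      ring

-- ===== VERDICT (by name: the statement is the Claim_ definition above) =====
theorem max_photo_replica_spec : Claim_equal_max_photo_replica := by
  intro l _ hpre
  show max_photo_replica l = max_photo_replica_alt l
  unfold max_photo_replica
  by_cases hlen : l.length ≤ 1
  · rw [if_pos hlen, alt_short l hlen]
  · rw [if_neg hlen]
    rcases hpre with h | h
    · omega
    · rw [loop_eq _ l 0 h (by omega)]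
      ring
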